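-- pv_equiv track=rewrite | github.com/bartytime4life/World-Discovery-Engine | world_engine/report.py | _as_html_from_md
-- ===== SOURCE A (Python) =====
-- from typing import Any, Dict, Iterable, List, Optional, Tuple, Union
--
-- def _as_html_from_md(md_lines: List[str], title: str) -> str:
--     html: List[str] = []
--     html.append("<!doctype html><html><head><meta charset='utf-8'>")
--     html.append(f"<title>{title}</title>")
--     html.append(
--         "<style>"
--         "body{font-family:system-ui,-apple-system,Segoe UI,Roboto,sans-serif;padding:1rem;max-width:820px;margin:auto;}"
--         "h1{font-size:1.6rem;margin:.2rem 0 .6rem} h2{font-size:1.2rem;margin:1rem 0 .4rem}"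
--         "ul{line-height:1.5} li{margin:.2rem 0} "
--         "code,pre{background:#f6f8fa;padding:.2rem .4rem;border-radius:.2rem}"
--         ".banner{padding:.5rem .75rem;border-radius:.5rem;margin:.5rem 0;background:#fff8e5;border:1px solid #f3d37a}"
--         "</style>"
--     )
--     html.append("</head><body>")
--
--     in_list = False
--     for line in md_lines:
--         if line.startswith("# "):
--             if in_list:
--                 html.append("</ul>"); in_list = False
--             html.append(f"<h1>{line[2:].strip()}</h1>")
--         elif line.startswith("## "):
--             if in_list:
--                 html.append("</ul>"); in_list = False
--             html.append(f"<h2>{line[3:].strip()}</h2>")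
--         elif line.startswith("- "):
--             if not in_list:
--                 html.append("<ul>"); in_list = True
--             html.append(f"<li>{line[2:].strip()}</li>")
--         elif not line.strip():
--             if in_list:
--                 html.append("</ul>"); in_list = False
--             html.append("<p></p>")
--         else:
--             if in_list:
--                 html.append("</ul>"); in_list = False
--             html.append(f"<p>{line}</p>")
--
--     if in_list:
--         html.append("</ul>")
--
--     html.append("</body></html>")
--     return "\n".join(html)
-- ===== SOURCE B (Python) =====
-- from typing import List
--
-- _HEAD_FMT = "<!doctype html><html><head><meta charset='utf-8'>"
-- _STYLE = (
--     "<style>"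
--     "body{font-family:system-ui,-apple-system,Segoe UI,Roboto,sans-serif;padding:1rem;max-width:820px;margin:auto;}"
--     "h1{font-size:1.6rem;margin:.2rem 0 .6rem} h2{font-size:1.2rem;margin:1rem 0 .4rem}"
--     "ul{line-height:1.5} li{margin:.2rem 0} "
--     "code,pre{background:#f6f8fa;padding:.2rem .4rem;border-radius:.2rem}"
--     ".banner{padding:.5rem .75rem;border-radius:.5rem;margin:.5rem 0;background:#fff8e5;border:1px solid #f3d37a}"
--     "</style>"
-- )
--
-- def _classify(line: str) -> str:
--     if line.startswith("# "):
--         return f"<h1>{line[2:].strip()}</h1>"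
--     if line.startswith("## "):
--         return f"<h2>{line[3:].strip()}</h2>"
--     if not line.strip():
--         return "<p></p>"
--     return f"<p>{line}</p>"
--
-- def _as_html_from_md(md_lines: List[str], title: str) -> str:
--     head = [_HEAD_FMT, f"<title>{title}</title>", _STYLE, "</head><body>"]
--     body: List[str] = []
--     i, n = 0, len(md_lines)
--     while i < n:
--         if md_lines[i].startswith("- "):
--             j = i
--             while j < n and md_lines[j].startswith("- "):
--                 j += 1
--             body.append("<ul>")
--             body.extend(f"<li>{l[2:].strip()}</li>" for l in md_lines[i:j])
--             body.append("</ul>")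
--             i = j
--         else:
--             body.append(_classify(md_lines[i]))
--             i += 1
--     return "\n".join(head + body + ["</body></html>"])
-- ===== Notes on version B (the rewrite author's own statement) =====
-- stated objective: alternative
-- what changed: Replaces A's single pass carrying an in_list flag (closing </ul> lazily before the next non-list element) with a run-based decomposition: non-list lines go through a standalone classifier, and each maximal run of '- ' lines is consumed at once and emitted as a complete <ul>...</ul> block.
import Mathlib
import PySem

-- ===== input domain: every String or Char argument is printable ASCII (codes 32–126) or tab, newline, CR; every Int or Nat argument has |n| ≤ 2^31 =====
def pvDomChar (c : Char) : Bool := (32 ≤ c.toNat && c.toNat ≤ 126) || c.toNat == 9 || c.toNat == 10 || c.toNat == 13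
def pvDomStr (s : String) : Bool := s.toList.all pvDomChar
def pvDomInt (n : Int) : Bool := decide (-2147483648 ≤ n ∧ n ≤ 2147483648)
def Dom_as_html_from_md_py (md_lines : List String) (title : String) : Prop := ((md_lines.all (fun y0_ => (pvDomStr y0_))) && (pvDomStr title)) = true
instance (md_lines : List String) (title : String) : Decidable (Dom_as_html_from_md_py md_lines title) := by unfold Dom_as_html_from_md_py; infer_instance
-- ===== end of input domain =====

-- B changes the decomposition: instead of A's single pass with an `in_list` flag,
-- B emits non-list lines via a classifier and consumes each run of "- " lines at
-- once as a whole <ul> block (objective: alternative decomposition, same cost).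


-- f-string concatenation, kept on the List Char side (String.append is kernel-opaque)
def pvCat (a b : String) : String := String.ofList (a.toList ++ b.toList)

def pvStyle : String :=
  "<style>body{font-family:system-ui,-apple-system,Segoe UI,Roboto,sans-serif;padding:1rem;max-width:820px;margin:auto;}h1{font-size:1.6rem;margin:.2rem 0 .6rem} h2{font-size:1.2rem;margin:1rem 0 .4rem}ul{line-height:1.5} li{margin:.2rem 0} code,pre{background:#f6f8fa;padding:.2rem .4rem;border-radius:.2rem}.banner{padding:.5rem .75rem;border-radius:.5rem;margin:.5rem 0;background:#fff8e5;border:1px solid #f3d37a}</style>"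

-- ===== PORT A =====
-- A's loop body: state = (html so far, in_list flag)
def aStep (st : List String × Bool) (line : String) : List String × Bool :=
  if PySem.Str.startswith line "# " then
    let h := if st.2 then st.1 ++ ["</ul>"] else st.1
    (h ++ [pvCat (pvCat "<h1>" (PySem.Str.strip (PySem.Str.slice line (some 2) none))) "</h1>"], false)
  else if PySem.Str.startswith line "## " then
    let h := if st.2 then st.1 ++ ["</ul>"] else st.1
    (h ++ [pvCat (pvCat "<h2>" (PySem.Str.strip (PySem.Str.slice line (some 3) none))) "</h2>"], false)
  else if PySem.Str.startswith line "- " then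
    let h := if st.2 then st.1 else st.1 ++ ["<ul>"]
    (h ++ [pvCat (pvCat "<li>" (PySem.Str.strip (PySem.Str.slice line (some 2) none))) "</li>"], true)
  else if (PySem.Str.strip line).toList.isEmpty then
    let h := if st.2 then st.1 ++ ["</ul>"] else st.1
    (h ++ ["<p></p>"], false)
  else
    let h := if st.2 then st.1 ++ ["</ul>"] else st.1
    (h ++ [pvCat (pvCat "<p>" line) "</p>"], false)

def as_html_from_md_py (md_lines : List String) (title : String) : String :=
  let html : List String :=
    ["<!doctype html><html><head><meta charset='utf-8'>",
     pvCat (pvCat "<title>" title) "</title>", pvStyle, "</head><body>"]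
  let st := md_lines.foldl aStep (html, false)
  let html := if st.2 then st.1 ++ ["</ul>"] else st.1
  PySem.Str.join "\n" (html ++ ["</body></html>"])

-- ===== PORT B =====
def bIsLi (line : String) : Bool := PySem.Str.startswith line "- "

def bLi (line : String) : String :=
  pvCat (pvCat "<li>" (PySem.Str.strip (PySem.Str.slice line (some 2) none))) "</li>"

def bClassify (line : String) : String :=
  if PySem.Str.startswith line "# " then
    pvCat (pvCat "<h1>" (PySem.Str.strip (PySem.Str.slice line (some 2) none))) "</h1>"
  else if PySem.Str.startswith line "## " then
    pvCat (pvCat "<h2>" (PySem.Str.strip (PySem.Str.slice line (some 3) none))) "</h2>"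
  else if (PySem.Str.strip line).toList.isEmpty then
    "<p></p>"
  else
    pvCat (pvCat "<p>" line) "</p>"

def bBody : List String → List String
  | [] => []
  | line :: rest =>
    if bIsLi line then
      ["<ul>"] ++ ((line :: rest).takeWhile bIsLi).map bLi ++ ["</ul>"]
        ++ bBody ((line :: rest).dropWhile bIsLi)
    else
      bClassify line :: bBody rest
termination_by xs => xs.length
decreasing_by
  · simp only [List.dropWhile]
    simp_all
    have := (List.dropWhile_sublist (l := rest) (p := bIsLi)).length_le
    omega
  · simp

def as_html_from_md_py_alt (md_lines : List String) (title : String) : String :=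
  let head : List String :=
    ["<!doctype html><html><head><meta charset='utf-8'>",
     pvCat (pvCat "<title>" title) "</title>", pvStyle, "</head><body>"]
  PySem.Str.join "\n" (head ++ bBody md_lines ++ ["</body></html>"])

-- ===== PRECONDITION & SPEC =====
def Spec_as_html_from_md_py (md_lines : List String) (title : String) (out : String) : Prop := out = as_html_from_md_py_alt md_lines title
instance (md_lines : List String) (title : String) (out : String) : Decidable (Spec_as_html_from_md_py md_lines title out) := by unfold Spec_as_html_from_md_py; infer_instance

-- ===== CLAIM (what is proved, stated in full; the proofs are below) =====
def Claim_equal_as_html_from_md_py : Prop := ∀ (md_lines : List String) (title : String), Dom_as_html_from_md_py md_lines title → Spec_as_html_from_md_py md_lines title (as_html_from_md_py md_lines title)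

-- ===== LEMMAS AND PROOFS =====

def finishA (st : List String × Bool) : List String :=
  if st.2 then st.1 ++ ["</ul>"] else st.1

-- a "- " line starts with neither "# " nor "## "
theorem li_not_h (line : String) (h : bIsLi line = true) :
    PySem.Str.startswith line "# " = false ∧ PySem.Str.startswith line "## " = false := by
  simp only [bIsLi] at h
  constructor <;>
  · by_contra hc
    simp only [Bool.not_eq_false] at hc
    rw [PySem.Str.startswith_eq, PySem.Chars.startswith_iff] at h hc
    rcases h with ⟨t1, h1⟩
    rcases hc with ⟨t2, h2⟩
    rw [← h1] at h2
    simp at h2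

theorem bBody_cons (line : String) (rest : List String) :
    bBody (line :: rest) =
      if bIsLi line then
        ["<ul>"] ++ ((line :: rest).takeWhile bIsLi).map bLi ++ ["</ul>"]
          ++ bBody ((line :: rest).dropWhile bIsLi)
      else bClassify line :: bBody rest := by
  rw [bBody]

theorem loop_eq (xs : List String) : ∀ acc : List String,
    (finishA (xs.foldl aStep (acc, false)) = acc ++ bBody xs) ∧
    (finishA (xs.foldl aStep (acc, true)) =
      acc ++ (xs.takeWhile bIsLi).map bLi ++ ["</ul>"] ++ bBody (xs.dropWhile bIsLi)) := by
  induction xs with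
  | nil => intro acc; simp [finishA, bBody]
  | cons line rest ih =>
    intro acc
    by_cases hli : bIsLi line = true
    · obtain ⟨h1, h2⟩ := li_not_h line hli
      have hli0 : PySem.Str.startswith line "- " = true := hli
      have hstep_f : aStep (acc, false) line = (acc ++ ["<ul>", bLi line], true) := by
        simp only [aStep, bLi, h1, h2, hli0]
        simp
      have hstep_t : aStep (acc, true) line = (acc ++ [bLi line], true) := by
        simp only [aStep, bLi, h1, h2, hli0]
        simp
      refine ⟨?_, ?_⟩
      · rw [List.foldl_cons, hstep_f, (ih (acc ++ ["<ul>", bLi line])).2,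
          bBody_cons, if_pos hli, List.takeWhile_cons_of_pos hli,
          List.dropWhile_cons_of_pos hli]
        simp
      · rw [List.foldl_cons, hstep_t, (ih (acc ++ [bLi line])).2,
          List.takeWhile_cons_of_pos hli, List.dropWhile_cons_of_pos hli]
        simp
    · have hli' : bIsLi line = false := by simpa using hli
      have hli0 : PySem.Str.startswith line "- " = false := hli'
      have hstep_f : aStep (acc, false) line = (acc ++ [bClassify line], false) := by
        simp only [aStep, bClassify, hli0]
        split_ifs <;> simp_all
      have hstep_t : aStep (acc, true) line = (acc ++ ["</ul>", bClassify line], false) := by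
        simp only [aStep, bClassify, hli0]
        split_ifs <;> simp_all
      refine ⟨?_, ?_⟩
      · rw [List.foldl_cons, hstep_f, (ih (acc ++ [bClassify line])).1,
          bBody_cons, if_neg (by simp [hli'])]
        simp
      · rw [List.foldl_cons, hstep_t, (ih (acc ++ ["</ul>", bClassify line])).1,
          List.takeWhile_cons_of_neg (by simp [hli']), List.dropWhile_cons_of_neg (by simp [hli']),
          bBody_cons, if_neg (by simp [hli'])]
        simp

-- ===== VERDICT (by name: the statement is the Claim_ definition above) =====
theorem as_html_from_md_py_spec : Claim_equal_as_html_from_md_py := by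
  intro md_lines title _
  unfold Spec_as_html_from_md_py as_html_from_md_py as_html_from_md_py_alt
  have h := (loop_eq md_lines
    ["<!doctype html><html><head><meta charset='utf-8'>",
     pvCat (pvCat "<title>" title) "</title>", pvStyle, "</head><body>"]).1
  simp only [finishA] at h
  simp only [h]
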